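-- pv_equiv track=rewrite | github.com/ColHoraceGentleman/ose-character-creator | src/equipment.py | best_affordable_weapon
-- ===== SOURCE A (Python) =====
-- WEAPONS = {
--     "Battle axe":       {"cost": 7,  "damage": "1d8", "qualities": ["Melee", "Slow", "Two-handed"], "encumbrance": 2},
--     "Club":             {"cost": 3,  "damage": "1d4", "qualities": ["Blunt", "Melee"], "encumbrance": 1},
--     "Crossbow":         {"cost": 30, "damage": "1d6", "qualities": ["Missile", "Reload", "Slow", "Two-handed"], "encumbrance": 2},
--     "Dagger":           {"cost": 3,  "damage": "1d4", "qualities": ["Melee", "Missile"], "encumbrance": 1},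
--     "Hand axe":         {"cost": 4,  "damage": "1d6", "qualities": ["Melee", "Missile"], "encumbrance": 1},
--     "Javelin":          {"cost": 1,  "damage": "1d4", "qualities": ["Missile"], "encumbrance": 1},
--     "Lance":            {"cost": 5,  "damage": "1d6", "qualities": ["Charge", "Melee"], "encumbrance": 2},
--     "Long bow":         {"cost": 40, "damage": "1d6", "qualities": ["Missile", "Two-handed"], "encumbrance": 2},
--     "Mace":             {"cost": 5,  "damage": "1d6", "qualities": ["Blunt", "Melee"], "encumbrance": 1},
--     "Polearm":          {"cost": 7,  "damage": "1d10","qualities": ["Brace", "Melee", "Slow", "Two-handed"], "encumbrance": 2},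
--     "Short bow":        {"cost": 25, "damage": "1d6", "qualities": ["Missile", "Two-handed"], "encumbrance": 2},
--     "Short sword":      {"cost": 7,  "damage": "1d6", "qualities": ["Melee"], "encumbrance": 1},
--     "Silver dagger":    {"cost": 30, "damage": "1d4", "qualities": ["Melee", "Missile"], "encumbrance": 1},
--     "Sling":            {"cost": 2,  "damage": "1d4", "qualities": ["Blunt", "Missile"], "encumbrance": 1},
--     "Spear":            {"cost": 4,  "damage": "1d6", "qualities": ["Brace", "Melee", "Missile"], "encumbrance": 1},
--     "Staff":            {"cost": 2,  "damage": "1d4", "qualities": ["Blunt", "Melee", "Slow", "Two-handed"], "encumbrance": 2},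
--     "Sword":            {"cost": 10, "damage": "1d8", "qualities": ["Melee"], "encumbrance": 1},
--     "Two-handed sword": {"cost": 15, "damage": "1d10","qualities": ["Melee", "Slow", "Two-handed"], "encumbrance": 2},
--     "Warhammer":        {"cost": 5,  "damage": "1d6", "qualities": ["Blunt", "Melee"], "encumbrance": 1},
-- }
--
-- CLASS_WEAPON_RULES = {
--     "Cleric":      {"allowed_qualities": ["Blunt"], "excluded": ["Long bow", "Two-handed sword", "Battle axe", "Polearm"]},
--     "Dwarf":       {"allowed_qualities": ["any"], "excluded": ["Long bow", "Two-handed sword", "Polearm"]},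
--     "Elf":         {"allowed_qualities": ["any"], "excluded": []},
--     "Fighter":     {"allowed_qualities": ["any"], "excluded": []},
--     "Halfling":    {"allowed_qualities": ["any"], "excluded": ["Long bow", "Two-handed sword", "Polearm", "Lance"]},
--     "Magic-User":  {"allowed_qualities": ["any"], "only": ["Dagger"]},
--     "Thief":       {"allowed_qualities": ["any"], "excluded": []},
-- }
--
-- def get_allowed_weapons(char_class: str) -> list:
--     """Return list of allowed weapon names for a class."""
--     rules = CLASS_WEAPON_RULES[char_class]
--     if "only" in rules:
--         return rules["only"]
--     excluded = rules.get("excluded", [])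
--     if "Blunt" in rules.get("allowed_qualities", []):
--         return [w for w, d in WEAPONS.items() if "Blunt" in d["qualities"] and w not in excluded]
--     return [w for w in WEAPONS if w not in excluded]
--
-- def best_affordable_weapon(char_class: str, gold: int) -> tuple:
--     """Return (weapon_name, cost) for best weapon affordable, by damage die then cost."""
--     allowed = get_allowed_weapons(char_class)
--     damage_rank = {"1d4": 1, "1d6": 2, "1d8": 3, "1d10": 4}
--     options = sorted(
--         [(w, WEAPONS[w]) for w in allowed if WEAPONS[w]["cost"] <= gold],
--         key=lambda x: (-damage_rank.get(x[1]["damage"], 0), x[1]["cost"])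
--     )
--     if options:
--         name, data = options[0]
--         return name, data["cost"]
--     return None, 0
-- ===== SOURCE B (Python) =====
-- WEAPONS = {
--     "Battle axe":       {"cost": 7,  "damage": "1d8", "qualities": ["Melee", "Slow", "Two-handed"], "encumbrance": 2},
--     "Club":             {"cost": 3,  "damage": "1d4", "qualities": ["Blunt", "Melee"], "encumbrance": 1},
--     "Crossbow":         {"cost": 30, "damage": "1d6", "qualities": ["Missile", "Reload", "Slow", "Two-handed"], "encumbrance": 2},
--     "Dagger":           {"cost": 3,  "damage": "1d4", "qualities": ["Melee", "Missile"], "encumbrance": 1},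
--     "Hand axe":         {"cost": 4,  "damage": "1d6", "qualities": ["Melee", "Missile"], "encumbrance": 1},
--     "Javelin":          {"cost": 1,  "damage": "1d4", "qualities": ["Missile"], "encumbrance": 1},
--     "Lance":            {"cost": 5,  "damage": "1d6", "qualities": ["Charge", "Melee"], "encumbrance": 2},
--     "Long bow":         {"cost": 40, "damage": "1d6", "qualities": ["Missile", "Two-handed"], "encumbrance": 2},
--     "Mace":             {"cost": 5,  "damage": "1d6", "qualities": ["Blunt", "Melee"], "encumbrance": 1},
--     "Polearm":          {"cost": 7,  "damage": "1d10","qualities": ["Brace", "Melee", "Slow", "Two-handed"], "encumbrance": 2},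
--     "Short bow":        {"cost": 25, "damage": "1d6", "qualities": ["Missile", "Two-handed"], "encumbrance": 2},
--     "Short sword":      {"cost": 7,  "damage": "1d6", "qualities": ["Melee"], "encumbrance": 1},
--     "Silver dagger":    {"cost": 30, "damage": "1d4", "qualities": ["Melee", "Missile"], "encumbrance": 1},
--     "Sling":            {"cost": 2,  "damage": "1d4", "qualities": ["Blunt", "Missile"], "encumbrance": 1},
--     "Spear":            {"cost": 4,  "damage": "1d6", "qualities": ["Brace", "Melee", "Missile"], "encumbrance": 1},
--     "Staff":            {"cost": 2,  "damage": "1d4", "qualities": ["Blunt", "Melee", "Slow", "Two-handed"], "encumbrance": 2},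
--     "Sword":            {"cost": 10, "damage": "1d8", "qualities": ["Melee"], "encumbrance": 1},
--     "Two-handed sword": {"cost": 15, "damage": "1d10","qualities": ["Melee", "Slow", "Two-handed"], "encumbrance": 2},
--     "Warhammer":        {"cost": 5,  "damage": "1d6", "qualities": ["Blunt", "Melee"], "encumbrance": 1},
-- }
--
-- CLASS_WEAPON_RULES = {
--     "Cleric":      {"allowed_qualities": ["Blunt"], "excluded": ["Long bow", "Two-handed sword", "Battle axe", "Polearm"]},
--     "Dwarf":       {"allowed_qualities": ["any"], "excluded": ["Long bow", "Two-handed sword", "Polearm"]},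
--     "Elf":         {"allowed_qualities": ["any"], "excluded": []},
--     "Fighter":     {"allowed_qualities": ["any"], "excluded": []},
--     "Halfling":    {"allowed_qualities": ["any"], "excluded": ["Long bow", "Two-handed sword", "Polearm", "Lance"]},
--     "Magic-User":  {"allowed_qualities": ["any"], "only": ["Dagger"]},
--     "Thief":       {"allowed_qualities": ["any"], "excluded": []},
-- }
--
-- # Weapons grouped by damage die, best tier first; inside each tier the weapons keep
-- # the WEAPONS-table order (every damage die in the table is one of these four).
-- _TIERS = [
--     [("Polearm", 7), ("Two-handed sword", 15)],                                     # 1d10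
--     [("Battle axe", 7), ("Sword", 10)],                                             # 1d8
--     [("Crossbow", 30), ("Hand axe", 4), ("Lance", 5), ("Long bow", 40), ("Mace", 5),
--      ("Short bow", 25), ("Short sword", 7), ("Spear", 4), ("Warhammer", 5)],        # 1d6
--     [("Club", 3), ("Dagger", 3), ("Javelin", 1), ("Silver dagger", 30),
--      ("Sling", 2), ("Staff", 2)],                                                   # 1d4
-- ]
--
-- _BLUNT = ["Club", "Mace", "Sling", "Staff", "Warhammer"]
--
-- def _allowed(rules, w):
--     """May this class use weapon w, under its rule entry?"""
--     if "only" in rules: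
--         return w in rules["only"]
--     if w in rules.get("excluded", []):
--         return False
--     if "Blunt" in rules.get("allowed_qualities", []):
--         return w in _BLUNT
--     return True
--
-- def best_affordable_weapon(char_class: str, gold: int) -> tuple:
--     """Scan the damage tiers best-first; in each tier take the cheapest affordable allowed weapon."""
--     rules = CLASS_WEAPON_RULES[char_class]
--     for tier in _TIERS:
--         best = None
--         for w, cost in tier:
--             if cost <= gold and _allowed(rules, w) and (best is None or cost < best[1]):
--                 best = (w, cost)
--         if best is not None:
--             return best
--     return None, 0
-- ===== Notes on version B (the rewrite author's own statement) =====
-- stated objective: alternative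
-- what changed: Replaces the build-pairs-then-stable-sort-and-take-head step with a best-first scan over damage tiers (weapons pre-grouped by damage die) that returns the cheapest affordable allowed weapon of the highest non-empty tier, using an allowed-predicate instead of materialising the allowed list.
import Mathlib
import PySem

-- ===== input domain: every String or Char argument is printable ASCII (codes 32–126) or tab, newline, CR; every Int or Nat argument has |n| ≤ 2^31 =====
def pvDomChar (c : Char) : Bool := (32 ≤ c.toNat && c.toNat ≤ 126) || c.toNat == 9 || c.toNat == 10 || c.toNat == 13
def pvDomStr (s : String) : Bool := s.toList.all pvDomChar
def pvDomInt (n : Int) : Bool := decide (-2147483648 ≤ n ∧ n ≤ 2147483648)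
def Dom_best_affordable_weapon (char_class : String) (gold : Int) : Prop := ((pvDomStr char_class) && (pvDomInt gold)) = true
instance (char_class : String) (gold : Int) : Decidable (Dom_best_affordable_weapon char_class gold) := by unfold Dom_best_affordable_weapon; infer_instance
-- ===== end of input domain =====

-- B replaces A's build-pairs/stable-sort/take-head with a best-first scan over damage tiers using an allowed-predicate; same return values (no speed claim).


-- ===== PORT A =====
-- weapon value = (cost, damage, qualities, encumbrance)
def pvWEAPONS : PySem.Dict String (Int × String × List String × Int) := PySem.Dict.mk [
  ("Battle axe",       (7,  "1d8", ["Melee", "Slow", "Two-handed"], 2)),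
  ("Club",             (3,  "1d4", ["Blunt", "Melee"], 1)),
  ("Crossbow",         (30, "1d6", ["Missile", "Reload", "Slow", "Two-handed"], 2)),
  ("Dagger",           (3,  "1d4", ["Melee", "Missile"], 1)),
  ("Hand axe",         (4,  "1d6", ["Melee", "Missile"], 1)),
  ("Javelin",          (1,  "1d4", ["Missile"], 1)),
  ("Lance",            (5,  "1d6", ["Charge", "Melee"], 2)),
  ("Long bow",         (40, "1d6", ["Missile", "Two-handed"], 2)),
  ("Mace",             (5,  "1d6", ["Blunt", "Melee"], 1)),
  ("Polearm",          (7,  "1d10", ["Brace", "Melee", "Slow", "Two-handed"], 2)),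
  ("Short bow",        (25, "1d6", ["Missile", "Two-handed"], 2)),
  ("Short sword",      (7,  "1d6", ["Melee"], 1)),
  ("Silver dagger",    (30, "1d4", ["Melee", "Missile"], 1)),
  ("Sling",            (2,  "1d4", ["Blunt", "Missile"], 1)),
  ("Spear",            (4,  "1d6", ["Brace", "Melee", "Missile"], 1)),
  ("Staff",            (2,  "1d4", ["Blunt", "Melee", "Slow", "Two-handed"], 2)),
  ("Sword",            (10, "1d8", ["Melee"], 1)),
  ("Two-handed sword", (15, "1d10", ["Melee", "Slow", "Two-handed"], 2)),
  ("Warhammer",        (5,  "1d6", ["Blunt", "Melee"], 1))]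

-- rule value = (allowed_qualities, "excluded" entry if present, "only" entry if present)
def pvRULES : PySem.Dict String (List String × Option (List String) × Option (List String)) := PySem.Dict.mk [
  ("Cleric",     (["Blunt"], some ["Long bow", "Two-handed sword", "Battle axe", "Polearm"], none)),
  ("Dwarf",      (["any"], some ["Long bow", "Two-handed sword", "Polearm"], none)),
  ("Elf",        (["any"], some [], none)),
  ("Fighter",    (["any"], some [], none)),
  ("Halfling",   (["any"], some ["Long bow", "Two-handed sword", "Polearm", "Lance"], none)),
  ("Magic-User", (["any"], none, some ["Dagger"])),
  ("Thief",      (["any"], some [], none))]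

-- WEAPONS[w]: every name looked up comes from pvWEAPONS itself or from the "only" list
-- ["Dagger"], so the .getD default is never reached; CLASS_WEAPON_RULES[char_class]
-- raises KeyError on unknown classes — exactly what Pre_ excludes below.
def pvWeaponData (w : String) : Int × String × List String × Int :=
  (PySem.Dict.get? pvWEAPONS w).getD (0, "", [], 0)

def get_allowed_weapons (char_class : String) : List String :=
  let rules := (PySem.Dict.get? pvRULES char_class).getD ([], none, none)
  match rules.2.2 with
  | some only => only
  | none =>
    let excluded := rules.2.1.getD []
    if rules.1.contains "Blunt" then
      (pvWEAPONS.items.filter (fun p => p.2.2.2.1.contains "Blunt" && !(excluded.contains p.1))).map (·.1)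
    else
      pvWEAPONS.keys.filter (fun w => !(excluded.contains w))

def pvDamageRank : PySem.Dict String Int := PySem.Dict.mk [("1d4", 1), ("1d6", 2), ("1d8", 3), ("1d10", 4)]

def best_affordable_weapon (char_class : String) (gold : Int) : Option String × Int :=
  match PySem.List.sorted2
      ((get_allowed_weapons char_class).filter (fun w => decide ((pvWeaponData w).1 ≤ gold))
        |>.map (fun w => (w, pvWeaponData w)))
      (fun x => -(PySem.Dict.getD pvDamageRank x.2.2.1 0)) (fun x => x.2.1) with
  | (name, data) :: _ => (some name, data.1)
  | [] => (none, 0)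

-- ===== PORT B =====
-- weapons grouped by damage die, best tier first, WEAPONS-table order inside a tier
def pvTiers : List (List (String × Int)) := [
  [("Polearm", 7), ("Two-handed sword", 15)],
  [("Battle axe", 7), ("Sword", 10)],
  [("Crossbow", 30), ("Hand axe", 4), ("Lance", 5), ("Long bow", 40), ("Mace", 5),
   ("Short bow", 25), ("Short sword", 7), ("Spear", 4), ("Warhammer", 5)],
  [("Club", 3), ("Dagger", 3), ("Javelin", 1), ("Silver dagger", 30),
   ("Sling", 2), ("Staff", 2)]]

def pvBlunt : List String := ["Club", "Mace", "Sling", "Staff", "Warhammer"]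

-- _allowed(rules, w): may this class use weapon w, under its rule entry?
def pvAllowed (rules : List String × Option (List String) × Option (List String)) (w : String) : Bool :=
  match rules.2.2 with
  | some only => only.contains w
  | none =>
    if (rules.2.1.getD []).contains w then false
    else if rules.1.contains "Blunt" then pvBlunt.contains w
    else true

-- inner loop: cheapest affordable allowed weapon of one tier (first among cost ties)
def pvScanTier (rules : List String × Option (List String) × Option (List String))
    (gold : Int) (tier : List (String × Int)) : Option (String × Int) :=
  tier.foldl
    (fun (best : Option (String × Int)) p =>
      if decide (p.2 ≤ gold) && pvAllowed rules p.1 &&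
         (match best with | none => true | some b => decide (p.2 < b.2)) then
        some p
      else best)
    none

-- outer loop with early return: first non-empty tier result wins
def pvBestTier (rules : List String × Option (List String) × Option (List String))
    (gold : Int) : List (List (String × Int)) → Option (String × Int)
  | [] => none
  | t :: rest =>
    match pvScanTier rules gold t with
    | some b => some b
    | none => pvBestTier rules gold rest

def best_affordable_weapon_alt (char_class : String) (gold : Int) : Option String × Int :=
  let rules := (PySem.Dict.get? pvRULES char_class).getD ([], none, none)
  match pvBestTier rules gold pvTiers with
  | some (w, cost) => (some w, cost)
  | none => (none, 0)

-- ===== PRECONDITION & SPEC =====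
-- Pre_ excludes exactly the classes on which CLASS_WEAPON_RULES[char_class] raises KeyError.
def Pre_best_affordable_weapon (char_class : String) (gold : Int) : Prop :=
  char_class ∈ ["Cleric", "Dwarf", "Elf", "Fighter", "Halfling", "Magic-User", "Thief"]
instance (char_class : String) (gold : Int) : Decidable (Pre_best_affordable_weapon char_class gold) := by unfold Pre_best_affordable_weapon; infer_instance

def pvWitness_best_affordable_weapon : String × Int := ("Fighter", 12)

def Spec_best_affordable_weapon (char_class : String) (gold : Int) (out : Option String × Int) : Prop := out = best_affordable_weapon_alt char_class gold
instance (char_class : String) (gold : Int) (out : Option String × Int) : Decidable (Spec_best_affordable_weapon char_class gold out) := by unfold Spec_best_affordable_weapon; infer_instance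

-- ===== CLAIM (what is proved, stated in full; the proofs are below) =====
def Claim_equal_best_affordable_weapon : Prop := ∀ (char_class : String) (gold : Int), Dom_best_affordable_weapon char_class gold → Pre_best_affordable_weapon char_class gold → Spec_best_affordable_weapon char_class gold (best_affordable_weapon char_class gold)

-- ===== LEMMAS AND PROOFS =====
-- Both ports compare gold only against the literal weapon costs, all in [1, 40]; clamping
-- gold into [0, 40] changes no comparison, and the clamped problem is finite (decide).
def pvClamp (gold : Int) : Int := if gold < 0 then 0 else if 40 < gold then 40 else gold

lemma costs_ok : ∀ cl ∈ ["Cleric", "Dwarf", "Elf", "Fighter", "Halfling", "Magic-User", "Thief"],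
    ∀ w ∈ get_allowed_weapons cl, 1 ≤ (pvWeaponData w).1 ∧ (pvWeaponData w).1 ≤ 40 := by decide

lemma tier_costs_ok : ∀ t ∈ pvTiers, ∀ p ∈ t, 1 ≤ p.2 ∧ p.2 ≤ 40 := by decide

lemma A_clamp (c : String) (gold : Int) (h : Pre_best_affordable_weapon c gold) :
    best_affordable_weapon c gold = best_affordable_weapon c (pvClamp gold) := by
  have key : List.filter (fun w => decide ((pvWeaponData w).1 ≤ gold)) (get_allowed_weapons c)
      = List.filter (fun w => decide ((pvWeaponData w).1 ≤ pvClamp gold)) (get_allowed_weapons c) := by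
    refine List.filter_congr (fun w hw => ?_)
    obtain ⟨h1, h2⟩ := costs_ok c h w hw
    simp only [decide_eq_decide]
    unfold pvClamp; split_ifs <;> omega
  unfold best_affordable_weapon
  rw [key]

lemma scan_clamp (r : List String × Option (List String) × Option (List String)) (gold : Int)
    (t : List (String × Int)) (h : ∀ p ∈ t, 1 ≤ p.2 ∧ p.2 ≤ 40) :
    pvScanTier r gold t = pvScanTier r (pvClamp gold) t := by
  unfold pvScanTier
  apply PySem.List.foldl_congr_mem
  intro best p hp
  obtain ⟨h1, h2⟩ := h p hp
  have : decide (p.2 ≤ gold) = decide (p.2 ≤ pvClamp gold) := by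
    simp only [decide_eq_decide]; unfold pvClamp; split_ifs <;> omega
  rw [this]

lemma B_clamp_loop (r : List String × Option (List String) × Option (List String)) (gold : Int)
    (ts : List (List (String × Int))) (h : ∀ t ∈ ts, ∀ p ∈ t, 1 ≤ p.2 ∧ p.2 ≤ 40) :
    pvBestTier r gold ts = pvBestTier r (pvClamp gold) ts := by
  induction ts with
  | nil => rfl
  | cons t rest ih =>
    unfold pvBestTier
    rw [scan_clamp r gold t (h t (by simp)), ih (fun t' ht' => h t' (by simp [ht']))]

lemma B_clamp (c : String) (gold : Int) :
    best_affordable_weapon_alt c gold = best_affordable_weapon_alt c (pvClamp gold) := by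
  unfold best_affordable_weapon_alt
  exact congrArg (fun o => match o with | some (w, cost) => (some w, cost) | none => (none, 0))
    (B_clamp_loop ((PySem.Dict.get? pvRULES c).getD ([], none, none)) gold pvTiers tier_costs_ok)

-- ===== VERDICT (by name: the statement is the Claim_ definition above) =====
theorem best_affordable_weapon_spec : Claim_equal_best_affordable_weapon := by
  intro char_class gold _ hpre
  unfold Spec_best_affordable_weapon
  rw [A_clamp char_class gold hpre, B_clamp char_class gold]
  have h0 : 0 ≤ pvClamp gold := by unfold pvClamp; split_ifs <;> omega
  have h40 : pvClamp gold ≤ 40 := by unfold pvClamp; split_ifs <;> omega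
  obtain ⟨g, hg, h0, h40⟩ : ∃ g, pvClamp gold = g ∧ 0 ≤ g ∧ g ≤ 40 := ⟨_, rfl, h0, h40⟩
  rw [hg]
  unfold Pre_best_affordable_weapon at hpre
  fin_cases hpre <;> interval_cases g <;> decide
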